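-- pv_equiv track=rewrite | github.com/xcombelle/sgftool | search.py | symetries_and_colors
-- ===== SOURCE A (Python) =====
-- def switch_color(point_list, size):
--     result = []
--     for x,y,color in point_list:
--         match color:
--            case 'X': color = 'O'
--            case 'O': color = 'X'
--         result.append((x,y,color))
--     return result
--
-- def apply(function, size, point_list):
--     result = []
--     for x,y,colors in point_list:
--         x,y=function(size,x,y)
--         result.append((x,y,colors))
--     return result
--
-- def mirror(size,x,y):
--     return (size-1-x,y)
--
-- def rotate_1_4(size,x,y):
--     return (size-1-y, x)
--
-- def symetries_and_colors(points_list, size, symmetries= True, color_exact = False):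
--     result=[points_list]
--
--     if not color_exact:
--         result.append(switch_color(points_list, size))
--
--     if symmetries == True:
--
--         # if we did
--         # for p in result:
--         #     result.append(apply( _f_ , size, p))
--         # it would extend result while iterating on it
--         # and eventually run out of memory while iterating an infinite loop
--
--         temp = result[:]
--         for p in temp:
--             result.append(apply(mirror, size, p))
--
--         temp = result[:]
--         for p in temp:
--             r1 = apply(rotate_1_4, size, p)
--             result.append(r1)
--             r2 = apply(rotate_1_4, size, r1)
--             result.append(r2)
--             result.append(apply(rotate_1_4, size, r2))
--     return result
-- ===== SOURCE B (Python) =====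
-- def symetries_and_colors(points_list, size, symmetries=True, color_exact=False):
--     # Flat transform-table: the 8 composed orientation maps, applied once each to
--     # the precomputed base color variants, in the exact order A's chained loops emit.
--     s = size - 1
--     T_ID  = lambda x, y: (x, y)
--     T_M   = lambda x, y: (s - x, y)
--     T_R1  = lambda x, y: (s - y, x)
--     T_R2  = lambda x, y: (s - x, s - y)
--     T_R3  = lambda x, y: (y, s - x)
--     T_MR1 = lambda x, y: (s - y, s - x)
--     T_MR2 = lambda x, y: (x, s - y)
--     T_MR3 = lambda x, y: (y, x)
--
--     def trans(t, pts):
--         return [(*t(x, y), c) for x, y, c in pts]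
--
--     bases = [points_list]
--     if not color_exact:
--         bases.append([(x, y, 'O' if c == 'X' else 'X' if c == 'O' else c)
--                       for x, y, c in points_list])
--     if symmetries != True:
--         return bases
--
--     out = []
--     for t in (T_ID, T_M):
--         out.extend(trans(t, b) for b in bases)
--     for group in ((T_R1, T_R2, T_R3), (T_MR1, T_MR2, T_MR3)):
--         for b in bases:
--             out.extend(trans(t, b) for t in group)
--     return out
-- ===== Notes on version B (the rewrite author's own statement) =====
-- stated objective: alternative
-- what changed: Replaces A's two chained 'transform the previous results again' accumulation loops with a flat table of the 8 composed orientation transforms, each applied once directly to the precomputed base color variants in the same output order.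
import Mathlib
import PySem

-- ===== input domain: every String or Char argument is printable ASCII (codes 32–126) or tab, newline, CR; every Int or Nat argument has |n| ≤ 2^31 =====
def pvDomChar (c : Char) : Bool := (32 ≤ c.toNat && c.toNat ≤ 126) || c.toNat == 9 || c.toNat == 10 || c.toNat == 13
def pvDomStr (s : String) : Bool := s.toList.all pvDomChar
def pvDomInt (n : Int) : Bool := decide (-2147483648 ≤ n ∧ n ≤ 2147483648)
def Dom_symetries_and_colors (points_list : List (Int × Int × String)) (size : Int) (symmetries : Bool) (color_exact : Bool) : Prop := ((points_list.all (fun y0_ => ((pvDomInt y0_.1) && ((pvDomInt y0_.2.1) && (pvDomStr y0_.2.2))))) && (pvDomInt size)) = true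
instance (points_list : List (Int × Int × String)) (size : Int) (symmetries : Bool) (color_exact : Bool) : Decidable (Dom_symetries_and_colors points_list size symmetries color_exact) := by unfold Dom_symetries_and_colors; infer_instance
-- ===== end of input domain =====

-- B replaces A's "transform the previous results again" accumulation chains by a flat
-- table of the 8 composed orientation transforms applied once each to the precomputed
-- base color variants (objective: alternative decomposition, same output order).

-- ===== PORT A =====
def switch_color (point_list : List (Int × Int × String)) (size : Int) : List (Int × Int × String) :=
  point_list.foldl (fun result p =>
    let color := match p.2.2 with
      | "X" => "O"
      | "O" => "X"
      | c => c
    result ++ [(p.1, p.2.1, color)]) []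

def applyF (function : Int → Int → Int → Int × Int) (size : Int)
    (point_list : List (Int × Int × String)) : List (Int × Int × String) :=
  point_list.foldl (fun result p =>
    let q := function size p.1 p.2.1
    result ++ [(q.1, q.2, p.2.2)]) []

def mirror (size x y : Int) : Int × Int := (size - 1 - x, y)

def rotate_1_4 (size x y : Int) : Int × Int := (size - 1 - y, x)

def symetries_and_colors (points_list : List (Int × Int × String)) (size : Int) (symmetries : Bool) (color_exact : Bool) : List (List (Int × Int × String)) :=
  let result := [points_list]
  let result := if !color_exact then result ++ [switch_color points_list size] else result
  if symmetries == true then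
    let temp := result
    let result := temp.foldl (fun r p => r ++ [applyF mirror size p]) result
    let temp := result
    temp.foldl (fun r p =>
      let r1 := applyF rotate_1_4 size p
      let r2 := applyF rotate_1_4 size r1
      r ++ [r1, r2, applyF rotate_1_4 size r2]) result
  else result

-- ===== PORT B =====
-- the 8 composed coordinate transforms (s = size - 1)
def altT_ID (x y : Int) : Int × Int := (x, y)
def altT_M (s x y : Int) : Int × Int := (s - x, y)
def altT_R1 (s x y : Int) : Int × Int := (s - y, x)
def altT_R2 (s x y : Int) : Int × Int := (s - x, s - y)
def altT_R3 (s x y : Int) : Int × Int := (y, s - x)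
def altT_MR1 (s x y : Int) : Int × Int := (s - y, s - x)
def altT_MR2 (s x y : Int) : Int × Int := (x, s - y)
def altT_MR3 (s x y : Int) : Int × Int := (y, x)

def altSwitch (pts : List (Int × Int × String)) : List (Int × Int × String) :=
  pts.map (fun p => (p.1, p.2.1, if p.2.2 = "X" then "O" else if p.2.2 = "O" then "X" else p.2.2))

def altTrans (t : Int → Int → Int × Int) (pts : List (Int × Int × String)) : List (Int × Int × String) :=
  pts.map (fun p => ((t p.1 p.2.1).1, (t p.1 p.2.1).2, p.2.2))

def symetries_and_colors_alt (points_list : List (Int × Int × String)) (size : Int) (symmetries : Bool) (color_exact : Bool) : List (List (Int × Int × String)) :=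
  let s := size - 1
  let bases := if color_exact then [points_list] else [points_list, altSwitch points_list]
  if symmetries then
    ([altT_ID, altT_M s].flatMap (fun t => bases.map (altTrans t))) ++
    ([[altT_R1 s, altT_R2 s, altT_R3 s], [altT_MR1 s, altT_MR2 s, altT_MR3 s]].flatMap
      (fun g => bases.flatMap (fun b => g.map (fun t => altTrans t b))))
  else bases

-- ===== PRECONDITION & SPEC =====
def Spec_symetries_and_colors (points_list : List (Int × Int × String)) (size : Int) (symmetries : Bool) (color_exact : Bool) (out : List (List (Int × Int × String))) : Prop := out = symetries_and_colors_alt points_list size symmetries color_exact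
instance (points_list : List (Int × Int × String)) (size : Int) (symmetries : Bool) (color_exact : Bool) (out : List (List (Int × Int × String))) : Decidable (Spec_symetries_and_colors points_list size symmetries color_exact out) := by unfold Spec_symetries_and_colors; infer_instance

-- ===== CLAIM (what is proved, stated in full; the proofs are below) =====
def Claim_equal_symetries_and_colors : Prop := ∀ (points_list : List (Int × Int × String)) (size : Int) (symmetries : Bool) (color_exact : Bool), Dom_symetries_and_colors points_list size symmetries color_exact → Spec_symetries_and_colors points_list size symmetries color_exact (symetries_and_colors points_list size symmetries color_exact)

-- ===== LEMMAS AND PROOFS =====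

theorem switch_color_eq (pl : List (Int × Int × String)) (size : Int) :
    switch_color pl size = altSwitch pl := by
  unfold switch_color altSwitch
  rw [PySem.List.foldl_append_singleton_eq_map]
  simp only [List.nil_append]
  apply List.map_congr_left
  intro p _
  rcases p with ⟨x, y, c⟩
  by_cases h1 : c = "X"
  · simp [h1]
  · by_cases h2 : c = "O" <;> simp [h1, h2]

theorem applyF_eq (f : Int → Int → Int → Int × Int) (size : Int) (pl : List (Int × Int × String)) :
    applyF f size pl = altTrans (f size) pl := by
  unfold applyF altTrans
  rw [PySem.List.foldl_append_singleton_eq_map]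
  simp

theorem altTrans_id (pl : List (Int × Int × String)) : altTrans altT_ID pl = pl := by
  simp [altTrans, altT_ID]

theorem altTrans_comp (t u : Int → Int → Int × Int) (pl : List (Int × Int × String)) :
    altTrans t (altTrans u pl) = altTrans (fun x y => t (u x y).1 (u x y).2) pl := by
  simp [altTrans, List.map_map, Function.comp_def]

theorem altTrans_congr {t u : Int → Int → Int × Int} (h : ∀ x y, t x y = u x y)
    (pl : List (Int × Int × String)) : altTrans t pl = altTrans u pl := by
  have : t = u := funext fun x => funext fun y => h x y
  rw [this]

theorem mirror_eq (size : Int) (pl : List (Int × Int × String)) :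
    applyF mirror size pl = altTrans (altT_M (size - 1)) pl := applyF_eq mirror size pl

theorem rot_eq (size : Int) (pl : List (Int × Int × String)) :
    applyF rotate_1_4 size pl = altTrans (altT_R1 (size - 1)) pl := applyF_eq rotate_1_4 size pl

theorem r_r (s : Int) (pl : List (Int × Int × String)) :
    altTrans (altT_R1 s) (altTrans (altT_R1 s) pl) = altTrans (altT_R2 s) pl := by
  rw [altTrans_comp]; exact altTrans_congr (fun x y => rfl) pl

theorem r_r2 (s : Int) (pl : List (Int × Int × String)) :
    altTrans (altT_R1 s) (altTrans (altT_R2 s) pl) = altTrans (altT_R3 s) pl := by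
  rw [altTrans_comp]
  exact altTrans_congr (fun x y => by simp [altT_R1, altT_R2, altT_R3]) pl

theorem r_m (s : Int) (pl : List (Int × Int × String)) :
    altTrans (altT_R1 s) (altTrans (altT_M s) pl) = altTrans (altT_MR1 s) pl := by
  rw [altTrans_comp]; exact altTrans_congr (fun x y => rfl) pl

theorem r2_m (s : Int) (pl : List (Int × Int × String)) :
    altTrans (altT_R2 s) (altTrans (altT_M s) pl) = altTrans (altT_MR2 s) pl := by
  rw [altTrans_comp]
  exact altTrans_congr (fun x y => by simp [altT_R2, altT_M, altT_MR2]) pl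

theorem r3_m (s : Int) (pl : List (Int × Int × String)) :
    altTrans (altT_R3 s) (altTrans (altT_M s) pl) = altTrans (altT_MR3 s) pl := by
  rw [altTrans_comp]
  exact altTrans_congr (fun x y => by simp [altT_R3, altT_M, altT_MR3]) pl

-- ===== VERDICT (by name: the statement is the Claim_ definition above) =====
theorem symetries_and_colors_spec : Claim_equal_symetries_and_colors := by
  intro pl size sym ce _
  unfold Spec_symetries_and_colors symetries_and_colors symetries_and_colors_alt
  cases sym <;> cases ce <;>
    simp [List.foldl, switch_color_eq, mirror_eq, rot_eq, altTrans_id, r_r, r_r2, r_m,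
      r2_m, r3_m]
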